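-- pv_equiv track=rewrite | github.com/arnavgupta00/lora-train | data/training/t11_1/t11_1_utils.py | apply_safety_margin
-- ===== SOURCE A (Python) =====
-- from typing import Any, Dict, List, Optional, Set, Tuple
--
-- def apply_safety_margin(
--     table_name: str,
--     required_columns: Set[str],
--     all_columns: List[str],
--     question: str,
--     hints: Optional[str],
--     is_primary_table: bool = False,
--     widened: bool = False,
-- ) -> Set[str]:
--     """
--     Apply deterministic safety margin rules.
--     Returns final set of columns to keep.
--
--     T11.1 changes from T11:
--     - Small table threshold: 5 -> 8
--     - Question/hint extras: 2 -> 5 (normal) / 8 (widened)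
--     - Primary table bonus: NEW - up to 5 (normal) / 8 (widened) adjacent cols
--     - Minimum columns per table: NEW - 4 (normal) / 5 (widened)
--     """
--     final_columns = set(required_columns)
--
--     # Tunable params based on mode
--     SMALL_TABLE_THRESHOLD = 8
--     MAX_QUESTION_EXTRAS = 8 if widened else 5
--     PRIMARY_TABLE_EXTRAS = 8 if widened else 5
--     MIN_COLS_PER_TABLE = 5 if widened else 4
--
--     # Rule A: Small tables (≤8 columns) - keep everything
--     if len(all_columns) <= SMALL_TABLE_THRESHOLD:
--         return set(all_columns)
--
--     # Rule B: Add columns matching question/hints (up to MAX_QUESTION_EXTRAS)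
--     question_lower = question.lower()
--     hints_lower = (hints or '').lower()
--     candidates = []
--
--     for col in sorted(all_columns):  # Sorted for determinism
--         if col in final_columns:
--             continue
--         col_lower = col.lower().replace('_', ' ').replace('`', '').replace('"', '')
--         col_words = col_lower.split()
--
--         # Check if column name appears in question or hints
--         if col_lower in question_lower or col_lower in hints_lower:
--             candidates.append(col)
--         else:
--             # Check individual words
--             for word in col_words:
--                 if len(word) > 2 and (word in question_lower or word in hints_lower):
--                     candidates.append(col)
--                     break
--
--     for col in candidates[:MAX_QUESTION_EXTRAS]:
--         final_columns.add(col)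
--
--     # Rule C: Primary table bonus - keep adjacent columns in DDL order
--     if is_primary_table and len(all_columns) > len(final_columns):
--         # Find indices of currently-kept columns in the DDL column order
--         required_indices = set()
--         for col in final_columns:
--             if col in all_columns:
--                 required_indices.add(all_columns.index(col))
--
--         # Collect adjacent columns (within ±2 positions of any kept column)
--         adjacent = []
--         for idx in sorted(required_indices):
--             for offset in [-2, -1, 1, 2]:
--                 neighbor_idx = idx + offset
--                 if 0 <= neighbor_idx < len(all_columns):
--                     neighbor_col = all_columns[neighbor_idx]
--                     if neighbor_col not in final_columns and neighbor_col not in adjacent: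
--                         adjacent.append(neighbor_col)
--
--         # Stable order: by DDL position
--         adjacent.sort(key=lambda c: all_columns.index(c))
--
--         # Add up to PRIMARY_TABLE_EXTRAS adjacent columns
--         added = 0
--         for col in adjacent:
--             if added >= PRIMARY_TABLE_EXTRAS:
--                 break
--             final_columns.add(col)
--             added += 1
--
--     # Rule D: Ensure minimum columns per table
--     min_cols = min(MIN_COLS_PER_TABLE, len(all_columns))
--     if len(final_columns) < min_cols:
--         # Add columns in DDL order until we reach minimum
--         for col in all_columns:
--             if col not in final_columns:
--                 final_columns.add(col)
--             if len(final_columns) >= min_cols: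
--                 break
--
--     return final_columns
-- ===== SOURCE B (Python) =====
-- def apply_safety_margin(
--     table_name,
--     required_columns,
--     all_columns,
--     question,
--     hints,
--     is_primary_table=False,
--     widened=False,
-- ):
--     final_columns = set(required_columns)
--
--     MAX_QUESTION_EXTRAS = 8 if widened else 5
--     PRIMARY_TABLE_EXTRAS = 8 if widened else 5
--     MIN_COLS_PER_TABLE = 5 if widened else 4
--
--     # Rule A: small tables keep everything
--     if len(all_columns) <= 8:
--         return set(all_columns)
--
--     # Rule B: columns mentioned in the question/hints, as a predicate + comprehension
--     q = question.lower()
--     h = (hints or '').lower()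
--
--     def mentioned(col):
--         cl = col.lower().replace('_', ' ').replace('`', '').replace('"', '')
--         return (cl in q or cl in h or
--                 any(len(w) > 2 and (w in q or w in h) for w in cl.split()))
--
--     candidates = [c for c in sorted(all_columns)
--                   if c not in final_columns and mentioned(c)]
--     final_columns.update(candidates[:MAX_QUESTION_EXTRAS])
--
--     # Rule C: single proximity scan in DDL order against an index set
--     # (no neighbor expansion, no dedup list, no re-sort)
--     if is_primary_table and len(all_columns) > len(final_columns):
--         kept = {all_columns.index(c) for c in final_columns if c in all_columns}
--         near = {c for j, c in enumerate(all_columns)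
--                 if any(j + o in kept for o in (-2, -1, 1, 2))}
--         extras = PRIMARY_TABLE_EXTRAS
--         for c in all_columns:
--             if extras == 0:
--                 break
--             if c not in final_columns and c in near:
--                 final_columns.add(c)
--                 extras -= 1
--
--     # Rule D: pad up to the minimum with a countdown scan in DDL order
--     min_cols = min(MIN_COLS_PER_TABLE, len(all_columns))
--     need = min_cols - len(final_columns)
--     if need > 0:
--         for c in all_columns:
--             if need == 0:
--                 break
--             if c not in final_columns:
--                 final_columns.add(c)
--                 need -= 1
--
--     return final_columns
-- ===== Notes on version B (the rewrite author's own statement) =====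
-- stated objective: alternative
-- what changed: Rule C is rewritten as a single proximity scan: instead of expanding plus/minus-2 neighbors around each sorted kept index into a dedup list and re-sorting it by DDL position, B builds a 'near' set in one enumerate pass and scans all_columns once in DDL order with a countdown; Rule B becomes a predicate plus comprehension and Rule D a countdown scan.
import Mathlib
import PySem

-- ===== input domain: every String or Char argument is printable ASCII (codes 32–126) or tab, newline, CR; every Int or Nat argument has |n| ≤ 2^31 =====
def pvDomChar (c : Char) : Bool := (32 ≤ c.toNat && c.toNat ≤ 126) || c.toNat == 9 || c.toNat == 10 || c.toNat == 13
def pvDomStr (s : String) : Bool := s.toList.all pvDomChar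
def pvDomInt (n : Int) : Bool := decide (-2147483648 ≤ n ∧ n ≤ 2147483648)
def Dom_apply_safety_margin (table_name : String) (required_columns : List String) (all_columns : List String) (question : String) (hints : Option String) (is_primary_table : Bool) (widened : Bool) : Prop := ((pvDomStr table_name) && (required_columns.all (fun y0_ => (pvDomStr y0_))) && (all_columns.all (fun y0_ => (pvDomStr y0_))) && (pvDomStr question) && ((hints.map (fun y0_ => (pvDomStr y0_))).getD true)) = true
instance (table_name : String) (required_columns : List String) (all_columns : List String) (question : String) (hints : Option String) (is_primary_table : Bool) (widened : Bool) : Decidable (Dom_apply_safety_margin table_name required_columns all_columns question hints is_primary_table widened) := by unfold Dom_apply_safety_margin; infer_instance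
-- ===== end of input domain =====

-- B rewrites Rule C as one proximity scan against an index set (and Rule B as a predicate +
-- comprehension, Rule D as a countdown scan); same selection, similar cost ("alternative").
-- Python A mutates no argument; the equivalence is about the returned set (ported as its
-- insertion-ordered duplicate-free list, which the proof shows is identical for A and B).

-- ===== PORT A =====

-- col.lower().replace('_',' ').replace('`','').replace('"','')
def asmNorm (col : String) : List Char :=
  PySem.Chars.replace (PySem.Chars.replace (PySem.Chars.replace
    (PySem.Chars.lower col.toList) ['_'] [' ']) ['`'] []) ['"'] []

-- inner 'for word in col_words: if …: append; break' loop (break = return true)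
def asmWordsHit : List (List Char) → List Char → List Char → Bool
  | [], _, _ => false
  | w :: ws, ql, hl =>
    if decide (2 < w.length) && (PySem.Chars.isIn w ql || PySem.Chars.isIn w hl) then true
    else asmWordsHit ws ql hl

-- Rule B candidate collection loop of A
def asmCandidates (fc : PySem.Set String) (all_columns : List String) (ql hl : List Char) : List String :=
  (PySem.List.sorted all_columns (fun c => c) false).foldl (fun acc col =>
    if PySem.Set.contains fc col then acc
    else
      let cl := asmNorm col
      if PySem.Chars.isIn cl ql || PySem.Chars.isIn cl hl then acc ++ [col]
      else if asmWordsHit (PySem.Chars.split₀ cl) ql hl then acc ++ [col]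
      else acc) []

-- Rule C of A: required_indices (first index of each kept column present in the DDL)
def asmKept (fc : PySem.Set String) (all_columns : List String) : PySem.Set Int :=
  fc.foldl (fun s col =>
    match PySem.List.index? all_columns col with
    | some i => PySem.Set.add s (i : Int)
    | none => s) PySem.Set.empty

-- Rule C of A: neighbor expansion around each kept index (±2), dedup list in visit order
def asmAdjRaw (fc : PySem.Set String) (all_columns : List String) : List String :=
  (PySem.List.sorted (asmKept fc all_columns) (fun x => x) false).foldl (fun acc idx =>
    ([-2, -1, 1, 2] : List Int).foldl (fun acc2 off =>
      if 0 ≤ idx + off ∧ idx + off < (all_columns.length : Int) then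
        match PySem.List.pyGet? all_columns (idx + off) with
        | some c =>
          if !(PySem.Set.contains fc c) && !(List.contains acc2 c) then acc2 ++ [c] else acc2
        | none => acc2   -- unreachable: the index was bounds-checked
      else acc2) acc) []

-- adjacent.sort(key=lambda c: all_columns.index(c)); the key is always found, getD 0 is exact
def asmAdjacent (fc : PySem.Set String) (all_columns : List String) : List String :=
  PySem.List.sorted (asmAdjRaw fc all_columns)
    (fun c => ((PySem.List.index? all_columns c).getD 0 : Nat)) false

def apply_safety_margin (table_name : String) (required_columns : List String) (all_columns : List String) (question : String) (hints : Option String) (is_primary_table : Bool) (widened : Bool) : List String :=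
  let final0 : PySem.Set String := PySem.Set.ofList required_columns
  let MAXQ : Int := if widened then 8 else 5
  let PRIM : Int := if widened then 8 else 5
  let MINC : Int := if widened then 5 else 4
  -- Rule A
  if (all_columns.length : Int) ≤ 8 then PySem.Set.ofList all_columns
  else
    -- Rule B
    let ql := PySem.Chars.lower question.toList
    let hl := PySem.Chars.lower (hints.getD "").toList
    let cands := asmCandidates final0 all_columns ql hl
    let final1 := (PySem.List.slice cands none (some MAXQ)).foldl
        (fun s col => PySem.Set.add s col) final0
    -- Rule C
    let final2 :=
      if is_primary_table = true ∧ PySem.Set.len final1 < (all_columns.length : Int) then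
        ((asmAdjacent final1 all_columns).foldl (fun (p : PySem.Set String × Int) col =>
          if PRIM ≤ p.2 then p else (PySem.Set.add p.1 col, p.2 + 1)) (final1, 0)).1
      else final1
    -- Rule D
    let min_cols : Int := min MINC (all_columns.length : Int)
    if PySem.Set.len final2 < min_cols then
      all_columns.foldl (fun s col =>
        if min_cols ≤ PySem.Set.len s then s else PySem.Set.add s col) final2
    else final2

-- ===== PORT B =====

def bNorm (col : String) : List Char :=
  PySem.Chars.replace (PySem.Chars.replace (PySem.Chars.replace
    (PySem.Chars.lower col.toList) ['_'] [' ']) ['`'] []) ['"'] []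

def bMentioned (ql hl : List Char) (col : String) : Bool :=
  let cl := bNorm col
  PySem.Chars.isIn cl ql || PySem.Chars.isIn cl hl ||
    (PySem.Chars.split₀ cl).any
      (fun w => decide (2 < w.length) && (PySem.Chars.isIn w ql || PySem.Chars.isIn w hl))

def bCandidates (fc : PySem.Set String) (all_columns : List String) (ql hl : List Char) : List String :=
  (PySem.List.sorted all_columns (fun c => c) false).filter
    (fun c => !(PySem.Set.contains fc c) && bMentioned ql hl c)

-- {all_columns.index(c) for c in final_columns if c in all_columns}
def bKept (fc : PySem.Set String) (all_columns : List String) : PySem.Set Int :=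
  fc.foldl (fun s col =>
    match PySem.List.index? all_columns col with
    | some i => PySem.Set.add s (i : Int)
    | none => s) PySem.Set.empty

-- {c for j, c in enumerate(all_columns) if any(j + o in kept for o in (-2,-1,1,2))}
def bNear (kept : PySem.Set Int) (all_columns : List String) : PySem.Set String :=
  (PySem.List.enumerate all_columns 0).foldl (fun s p =>
    if ([-2, -1, 1, 2] : List Int).any (fun o => PySem.Set.contains kept (p.1 + o))
    then PySem.Set.add s p.2 else s) PySem.Set.empty

def apply_safety_margin_alt (table_name : String) (required_columns : List String) (all_columns : List String) (question : String) (hints : Option String) (is_primary_table : Bool) (widened : Bool) : List String :=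
  let final0 : PySem.Set String := PySem.Set.ofList required_columns
  let MAXQ : Int := if widened then 8 else 5
  let PRIM : Int := if widened then 8 else 5
  let MINC : Int := if widened then 5 else 4
  -- Rule A
  if (all_columns.length : Int) ≤ 8 then PySem.Set.ofList all_columns
  else
    -- Rule B
    let ql := PySem.Chars.lower question.toList
    let hl := PySem.Chars.lower (hints.getD "").toList
    let cands := bCandidates final0 all_columns ql hl
    let final1 := PySem.Set.update final0 (PySem.List.slice cands none (some MAXQ))
    -- Rule C: single proximity scan with a countdown
    let final2 :=
      if is_primary_table = true ∧ PySem.Set.len final1 < (all_columns.length : Int) then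
        let near := bNear (bKept final1 all_columns) all_columns
        (all_columns.foldl (fun (p : PySem.Set String × Int) c =>
          if p.2 = 0 then p
          else if !(PySem.Set.contains p.1 c) && PySem.Set.contains near c then
            (PySem.Set.add p.1 c, p.2 - 1)
          else p) (final1, PRIM)).1
      else final1
    -- Rule D: countdown scan
    let min_cols : Int := min MINC (all_columns.length : Int)
    let need : Int := min_cols - PySem.Set.len final2
    if 0 < need then
      (all_columns.foldl (fun (p : PySem.Set String × Int) c =>
        if p.2 = 0 then p
        else if !(PySem.Set.contains p.1 c) then (PySem.Set.add p.1 c, p.2 - 1)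
        else p) (final2, need)).1
    else final2

-- ===== PRECONDITION & SPEC =====
def Spec_apply_safety_margin (table_name : String) (required_columns : List String) (all_columns : List String) (question : String) (hints : Option String) (is_primary_table : Bool) (widened : Bool) (out : List String) : Prop := out = apply_safety_margin_alt table_name required_columns all_columns question hints is_primary_table widened
instance (table_name : String) (required_columns : List String) (all_columns : List String) (question : String) (hints : Option String) (is_primary_table : Bool) (widened : Bool) (out : List String) : Decidable (Spec_apply_safety_margin table_name required_columns all_columns question hints is_primary_table widened out) := by unfold Spec_apply_safety_margin; infer_instance

-- ===== CLAIM (what is proved, stated in full; the proofs are below) =====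
def Claim_equal_apply_safety_margin : Prop := ∀ (table_name : String) (required_columns : List String) (all_columns : List String) (question : String) (hints : Option String) (is_primary_table : Bool) (widened : Bool), Dom_apply_safety_margin table_name required_columns all_columns question hints is_primary_table widened → Spec_apply_safety_margin table_name required_columns all_columns question hints is_primary_table widened (apply_safety_margin table_name required_columns all_columns question hints is_primary_table widened)

-- ===== LEMMAS AND PROOFS =====

-- the selection order of B's Rule C scan: first-occurrence order of the added columns
def lrecSel (near : PySem.Set String) : List String → PySem.Set String → List String
  | [], _ => []
  | c :: t, s =>
    if !(PySem.Set.contains s c) && PySem.Set.contains near c then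
      c :: lrecSel near t (PySem.Set.add s c)
    else lrecSel near t s

theorem asmWordsHit_eq_any (ws : List (List Char)) (ql hl : List Char) :
    asmWordsHit ws ql hl
      = ws.any (fun w => decide (2 < w.length) && (PySem.Chars.isIn w ql || PySem.Chars.isIn w hl)) := by
  induction ws with
  | nil => rfl
  | cons w ws ih =>
    simp only [asmWordsHit, List.any_cons, ih]
    cases h : (decide (2 < w.length) && (PySem.Chars.isIn w ql || PySem.Chars.isIn w hl)) <;> simp [h]

theorem candidates_eq (fc : PySem.Set String) (all_columns : List String) (ql hl : List Char) :
    asmCandidates fc all_columns ql hl = bCandidates fc all_columns ql hl := by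
  unfold asmCandidates bCandidates
  have hstep : (fun (acc : List String) col =>
      if PySem.Set.contains fc col then acc
      else
        let cl := asmNorm col
        if PySem.Chars.isIn cl ql || PySem.Chars.isIn cl hl then acc ++ [col]
        else if asmWordsHit (PySem.Chars.split₀ cl) ql hl then acc ++ [col]
        else acc)
      = (fun acc col => if (!(PySem.Set.contains fc col) && bMentioned ql hl col) = true
          then acc ++ [col] else acc) := by
    funext acc col
    simp only [bMentioned, show bNorm col = asmNorm col from rfl, asmWordsHit_eq_any]
    split_ifs <;> simp_all [PySem.Set.contains] <;> aesop
  rw [hstep, PySem.List.foldl_append_if_eq_filter]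
  simp

theorem contains_false_iff {α : Type} [BEq α] [LawfulBEq α] (s : PySem.Set α) (c : α) :
    PySem.Set.contains s c = false ↔ c ∉ s := by
  rw [← PySem.Set.contains_iff]
  cases PySem.Set.contains s c <;> simp

theorem contains_mono_add {α : Type} [BEq α] [LawfulBEq α] {s : PySem.Set α} {x c : α}
    (h : PySem.Set.contains s c = true) : PySem.Set.contains (PySem.Set.add s x) c = true := by
  rw [PySem.Set.contains_iff] at *
  exact (PySem.Set.mem_add s x c).mpr (Or.inl h)

theorem foldB_count (near : PySem.Set String) (l : List String) :
    ∀ (s : PySem.Set String) (k : Int), 0 ≤ k →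
    (l.foldl (fun (p : PySem.Set String × Int) c =>
      if p.2 = 0 then p
      else if !(PySem.Set.contains p.1 c) && PySem.Set.contains near c then
        (PySem.Set.add p.1 c, p.2 - 1)
      else p) (s, k)).1
    = PySem.Set.update s ((lrecSel near l s).take k.toNat) := by
  induction l with
  | nil => intro s k _; simp [lrecSel, PySem.Set.update]
  | cons c l ih =>
    intro s k hk
    rw [List.foldl_cons]
    by_cases h0 : k = 0
    · subst h0
      have hstep : (if ((s, (0:Int)).2 = 0) then (s, (0:Int))
          else if !(PySem.Set.contains (s, (0:Int)).1 c) && PySem.Set.contains near c then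
            (PySem.Set.add (s, (0:Int)).1 c, (s, (0:Int)).2 - 1) else (s, (0:Int))) = (s, 0) := by simp
      rw [hstep, ih s 0 le_rfl]
      simp [PySem.Set.update]
    · by_cases hcs : c ∈ s
      · have hstep : (if ((s, k).2 = 0) then (s, k)
            else if !(PySem.Set.contains (s, k).1 c) && PySem.Set.contains near c then
              (PySem.Set.add (s, k).1 c, (s, k).2 - 1) else (s, k)) = (s, k) := by
          simp [h0, PySem.Set.contains, hcs]
        rw [hstep, ih s k hk]
        have : lrecSel near (c :: l) s = lrecSel near l s := by
          simp [lrecSel, PySem.Set.contains, hcs]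
        rw [this]
      · by_cases hcn : c ∈ near
        · have hstep : (if ((s, k).2 = 0) then (s, k)
              else if !(PySem.Set.contains (s, k).1 c) && PySem.Set.contains near c then
                (PySem.Set.add (s, k).1 c, (s, k).2 - 1) else (s, k)) = (PySem.Set.add s c, k - 1) := by
            simp [h0, PySem.Set.contains, hcs, hcn]
          have h1 : k.toNat = (k - 1).toNat + 1 := by omega
          rw [hstep, ih _ (k-1) (by omega)]
          have : lrecSel near (c :: l) s = c :: lrecSel near l (PySem.Set.add s c) := by
            simp [lrecSel, PySem.Set.contains, hcs, hcn]
          rw [this, h1, List.take_succ_cons]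
          rfl
        · have hstep : (if ((s, k).2 = 0) then (s, k)
              else if !(PySem.Set.contains (s, k).1 c) && PySem.Set.contains near c then
                (PySem.Set.add (s, k).1 c, (s, k).2 - 1) else (s, k)) = (s, k) := by
            simp [h0, PySem.Set.contains, hcn]
          rw [hstep, ih s k hk]
          have : lrecSel near (c :: l) s = lrecSel near l s := by
            simp [lrecSel, PySem.Set.contains, hcn]
          rw [this]

theorem foldD_eq (m : Int) (l : List String) : ∀ (s : PySem.Set String), PySem.Set.len s ≤ m →
    l.foldl (fun s col => if m ≤ PySem.Set.len s then s else PySem.Set.add s col) s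
    = (l.foldl (fun (p : PySem.Set String × Int) c =>
        if p.2 = 0 then p
        else if !(PySem.Set.contains p.1 c) then (PySem.Set.add p.1 c, p.2 - 1)
        else p) (s, m - PySem.Set.len s)).1 := by
  induction l with
  | nil => intro s _; rfl
  | cons c l ih =>
    intro s hs
    rw [List.foldl_cons, List.foldl_cons]
    by_cases he : m ≤ PySem.Set.len s
    · have h0 : m - PySem.Set.len s = 0 := by omega
      rw [if_pos he, h0]
      have hstep : (if ((s, (0:Int)).2 = 0) then (s, (0:Int))
          else if !(PySem.Set.contains (s, (0:Int)).1 c) then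
            (PySem.Set.add (s, (0:Int)).1 c, (s, (0:Int)).2 - 1) else (s, (0:Int))) = (s, 0) := by simp
      rw [hstep, show (s, (0:Int)) = (s, m - PySem.Set.len s) from by rw [h0]]
      exact ih s hs
    · rw [if_neg he]
      have hne : ¬ (m - PySem.Set.len s = 0) := by omega
      have hne2 : ¬ (m - (List.length s : Int) = 0) := hne
      by_cases hcs : c ∈ s
      · have hadd : PySem.Set.add s c = s := by
          simp [PySem.Set.add, PySem.Set.contains, hcs]
        have hstep : (if ((s, m - PySem.Set.len s).2 = 0) then (s, m - PySem.Set.len s)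
            else if !(PySem.Set.contains (s, m - PySem.Set.len s).1 c) then
              (PySem.Set.add (s, m - PySem.Set.len s).1 c, (s, m - PySem.Set.len s).2 - 1)
            else (s, m - PySem.Set.len s)) = (s, m - PySem.Set.len s) := by
          simp [hne, hne2, PySem.Set.contains, hcs]
        rw [hstep, hadd]
        exact ih s hs
      · have hlen : PySem.Set.len (PySem.Set.add s c) = PySem.Set.len s + 1 := by
          simp [PySem.Set.add, PySem.Set.contains, hcs, PySem.Set.len]
        have hstep : (if ((s, m - PySem.Set.len s).2 = 0) then (s, m - PySem.Set.len s)
            else if !(PySem.Set.contains (s, m - PySem.Set.len s).1 c) then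
              (PySem.Set.add (s, m - PySem.Set.len s).1 c, (s, m - PySem.Set.len s).2 - 1)
            else (s, m - PySem.Set.len s)) = (PySem.Set.add s c, m - PySem.Set.len s - 1) := by
          simp [hne, hne2, PySem.Set.contains, hcs]
        rw [hstep, show (PySem.Set.add s c, m - PySem.Set.len s - 1)
            = (PySem.Set.add s c, m - PySem.Set.len (PySem.Set.add s c)) from by rw [hlen]; ring_nf]
        exact ih (PySem.Set.add s c) (by omega)

theorem lrecSel_spec (near : PySem.Set String) (all_columns : List String) :
    ∀ (t pre : List String) (s : PySem.Set String),
    all_columns = pre ++ t →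
    (∀ c, c ∈ pre → PySem.Set.contains near c = true → PySem.Set.contains s c = true) →
    (lrecSel near t s).Nodup ∧
    (∀ c, c ∈ lrecSel near t s ↔
      (c ∈ t ∧ PySem.Set.contains s c = false ∧ PySem.Set.contains near c = true)) ∧
    (∀ c, c ∈ lrecSel near t s → pre.length ≤ (PySem.List.index? all_columns c).getD 0) ∧
    (lrecSel near t s).Pairwise (fun a b =>
      ((PySem.List.index? all_columns a).getD 0 : Nat) < (PySem.List.index? all_columns b).getD 0) := by
  intro t
  induction t with
  | nil => intro pre s _ _; refine ⟨by simp [lrecSel], fun c => by simp [lrecSel], fun c => by simp [lrecSel], by simp [lrecSel]⟩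
  | cons c t ih =>
    intro pre s hall hinv
    by_cases hcs : c ∈ s
    · have hcsB : PySem.Set.contains s c = true := (PySem.Set.contains_iff s c).mpr hcs
      have hres : lrecSel near (c :: t) s = lrecSel near t s := by
        show (if !(PySem.Set.contains s c) && PySem.Set.contains near c then
          c :: lrecSel near t (PySem.Set.add s c) else lrecSel near t s) = _
        rw [hcsB]; simp
      have hall' : all_columns = (pre ++ [c]) ++ t := by rw [hall]; simp
      have hinv' : ∀ d, d ∈ pre ++ [c] → PySem.Set.contains near d = true →
          PySem.Set.contains s d = true := by
        intro d hd hn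
        rcases List.mem_append.mp hd with hd | hd
        · exact hinv d hd hn
        · rw [List.mem_singleton] at hd; subst hd; exact hcsB
      obtain ⟨nd, hmem, hlb, hpw⟩ := ih (pre ++ [c]) s hall' hinv'
      rw [hres]
      refine ⟨nd, fun d => ?_, fun d hd => ?_, hpw⟩
      · rw [hmem d]
        constructor
        · rintro ⟨h1, h2, h3⟩; exact ⟨List.mem_cons_of_mem _ h1, h2, h3⟩
        · rintro ⟨h1, h2, h3⟩
          rcases List.mem_cons.mp h1 with rfl | h1'
          · rw [hcsB] at h2; cases h2
          · exact ⟨h1', h2, h3⟩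
      · have := hlb d hd
        simp only [List.length_append, List.length_singleton] at this
        omega
    · have hcsB : PySem.Set.contains s c = false := (contains_false_iff s c).mpr hcs
      by_cases hcn : c ∈ near
      · -- emitted
        have hcnB : PySem.Set.contains near c = true := (PySem.Set.contains_iff near c).mpr hcn
        have hres : lrecSel near (c :: t) s = c :: lrecSel near t (PySem.Set.add s c) := by
          show (if !(PySem.Set.contains s c) && PySem.Set.contains near c then
            c :: lrecSel near t (PySem.Set.add s c) else lrecSel near t s) = _
          rw [hcsB, hcnB]; simp
        have hcpre : c ∉ pre := by
          intro h
          exact hcs ((PySem.Set.contains_iff s c).mp (hinv c h hcnB))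
        have hkey : PySem.List.index? all_columns c = some pre.length :=
          (PySem.List.index?_eq_some_iff all_columns c pre.length).mpr ⟨pre, t, hall, rfl, hcpre⟩
        have hall' : all_columns = (pre ++ [c]) ++ t := by rw [hall]; simp
        have hinv' : ∀ d, d ∈ pre ++ [c] → PySem.Set.contains near d = true →
            PySem.Set.contains (PySem.Set.add s c) d = true := by
          intro d hd hn
          rcases List.mem_append.mp hd with hd | hd
          · exact contains_mono_add (hinv d hd hn)
          · rw [List.mem_singleton] at hd; rw [hd]
            exact (PySem.Set.contains_iff _ _).mpr ((PySem.Set.mem_add s c c).mpr (Or.inr rfl))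
        obtain ⟨nd, hmem, hlb, hpw⟩ := ih (pre ++ [c]) (PySem.Set.add s c) hall' hinv'
        rw [hres]
        have hcnotin : c ∉ lrecSel near t (PySem.Set.add s c) := by
          intro h
          have h2 := ((hmem c).mp h).2.1
          rw [(contains_false_iff _ _)] at h2
          exact h2 ((PySem.Set.mem_add s c c).mpr (Or.inr rfl))
        constructor
        · exact List.nodup_cons.mpr ⟨hcnotin, nd⟩
        refine ⟨fun d => ?_, fun d hd => ?_, ?_⟩
        · constructor
          · intro hdmem
            rcases List.mem_cons.mp hdmem with rfl | hd'
            · exact ⟨List.mem_cons_self .., hcsB, hcnB⟩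
            · obtain ⟨h1, h2, h3⟩ := (hmem d).mp hd'
              rw [contains_false_iff] at h2
              refine ⟨List.mem_cons_of_mem _ h1, ?_, h3⟩
              rw [contains_false_iff]
              intro hds
              exact h2 ((PySem.Set.mem_add s c d).mpr (Or.inl hds))
          · rintro ⟨h1, h2, h3⟩
            by_cases hdc : d = c
            · subst hdc; exact List.mem_cons_self ..
            · rcases List.mem_cons.mp h1 with rfl | h1'
              · exact absurd rfl hdc
              · refine List.mem_cons_of_mem _ ((hmem d).mpr ⟨h1', ?_, h3⟩)
                rw [contains_false_iff] at h2 ⊢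
                intro hmem2
                rcases (PySem.Set.mem_add s c d).mp hmem2 with h | h
                · exact h2 h
                · exact hdc h
        · rcases List.mem_cons.mp hd with rfl | hd'
          · rw [hkey]; simp
          · have := hlb d hd'
            simp only [List.length_append, List.length_singleton] at this
            omega
        · refine List.pairwise_cons.mpr ⟨fun b hb => ?_, hpw⟩
          have := hlb b hb
          simp only [List.length_append, List.length_singleton] at this
          rw [hkey]
          simp only [Option.getD_some]
          omega
      · have hcnB : PySem.Set.contains near c = false := (contains_false_iff near c).mpr hcn
        have hres : lrecSel near (c :: t) s = lrecSel near t s := by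
          show (if !(PySem.Set.contains s c) && PySem.Set.contains near c then
            c :: lrecSel near t (PySem.Set.add s c) else lrecSel near t s) = _
          rw [hcnB]; simp
        have hall' : all_columns = (pre ++ [c]) ++ t := by rw [hall]; simp
        have hinv' : ∀ d, d ∈ pre ++ [c] → PySem.Set.contains near d = true →
            PySem.Set.contains s d = true := by
          intro d hd hn
          rcases List.mem_append.mp hd with hd | hd
          · exact hinv d hd hn
          · rw [List.mem_singleton] at hd; rw [hd] at hn; rw [hn] at hcnB; cases hcnB
        obtain ⟨nd, hmem, hlb, hpw⟩ := ih (pre ++ [c]) s hall' hinv'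
        rw [hres]
        refine ⟨nd, fun d => ?_, fun d hd => ?_, hpw⟩
        · rw [hmem d]
          constructor
          · rintro ⟨h1, h2, h3⟩; exact ⟨List.mem_cons_of_mem _ h1, h2, h3⟩
          · rintro ⟨h1, h2, h3⟩
            rcases List.mem_cons.mp h1 with rfl | h1'
            · rw [h3] at hcnB; cases hcnB
            · exact ⟨h1', h2, h3⟩
        · have := hlb d hd
          simp only [List.length_append, List.length_singleton] at this
          omega

theorem nearFold_mem (kept : PySem.Set Int) (xs : List String) :
    ∀ (n : Int) (s : PySem.Set String) (c : String),
    c ∈ (PySem.List.enumerate xs n).foldl (fun s p =>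
      if ([-2, -1, 1, 2] : List Int).any (fun o => PySem.Set.contains kept (p.1 + o))
      then PySem.Set.add s p.2 else s) s
    ↔ c ∈ s ∨ ∃ j : Nat, ∃ _ : j < xs.length, xs[j] = c ∧
        (([-2, -1, 1, 2] : List Int).any (fun o => PySem.Set.contains kept ((n + j) + o))) = true := by
  induction xs with
  | nil => intro n s c; simp [PySem.List.enumerate]
  | cons x xs ih =>
    intro n s c
    rw [PySem.List.enumerate_cons, List.foldl_cons]
    by_cases h : (([-2, -1, 1, 2] : List Int).any (fun o => PySem.Set.contains kept (n + o))) = true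
    · simp only [if_pos h, ih, PySem.Set.mem_add]
      constructor
      · rintro ((hs | rfl) | ⟨j, hj, hc, ha⟩)
        · exact Or.inl hs
        · exact Or.inr ⟨0, by simp, by simp, by simpa using h⟩
        · exact Or.inr ⟨j + 1, by simpa using hj, by simpa using hc,
            by rw [show (n : Int) + (↑(j+1)) = n + 1 + j by push_cast; ring]; exact ha⟩
      · rintro (hs | ⟨j, hj, hc, ha⟩)
        · exact Or.inl (Or.inl hs)
        · cases j with
          | zero => exact Or.inl (Or.inr (by simpa using hc.symm))
          | succ j => exact Or.inr ⟨j, by simpa using hj, by simpa using hc,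
              by rw [show (n + 1 : Int) + j = n + ↑(j+1) by push_cast; ring]; exact ha⟩
    · simp only [if_neg h, ih]
      constructor
      · rintro (hs | ⟨j, hj, hc, ha⟩)
        · exact Or.inl hs
        · exact Or.inr ⟨j + 1, by simpa using hj, by simpa using hc,
            by rw [show (n : Int) + (↑(j+1)) = n + 1 + j by push_cast; ring]; exact ha⟩
      · rintro (hs | ⟨j, hj, hc, ha⟩)
        · exact Or.inl hs
        · cases j with
          | zero => exact absurd (by simpa using ha) h
          | succ j => exact Or.inr ⟨j, by simpa using hj, by simpa using hc,
              by rw [show (n + 1 : Int) + j = n + ↑(j+1) by push_cast; ring]; exact ha⟩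

theorem bNear_mem (kept : PySem.Set Int) (all_columns : List String) (c : String) :
    c ∈ bNear kept all_columns ↔
      ∃ j : Nat, ∃ _ : j < all_columns.length, all_columns[j] = c ∧
        (([-2, -1, 1, 2] : List Int).any
          (fun o => PySem.Set.contains kept ((j : Int) + o))) = true := by
  rw [bNear, nearFold_mem]
  simp [PySem.Set.empty]

theorem adjStep_spec (fc : PySem.Set String) (all_columns : List String) (x : Int)
    (acc : List String) (hnd : acc.Nodup) :
    (if 0 ≤ x ∧ x < (all_columns.length : Int) then
        match PySem.List.pyGet? all_columns x with
        | some c =>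
          if !(PySem.Set.contains fc c) && !(List.contains acc c) then acc ++ [c] else acc
        | none => acc
      else acc).Nodup ∧
    ∀ c, c ∈ (if 0 ≤ x ∧ x < (all_columns.length : Int) then
        match PySem.List.pyGet? all_columns x with
        | some c =>
          if !(PySem.Set.contains fc c) && !(List.contains acc c) then acc ++ [c] else acc
        | none => acc
      else acc) ↔ c ∈ acc ∨ (PySem.Set.contains fc c = false ∧ 0 ≤ x ∧
        x < (all_columns.length : Int) ∧ PySem.List.pyGet? all_columns x = some c) := by
  by_cases hb : 0 ≤ x ∧ x < (all_columns.length : Int)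
  · rw [if_pos hb]
    cases hget : PySem.List.pyGet? all_columns x with
    | none =>
      refine ⟨hnd, fun c => ?_⟩
      simp [hget]
    | some c' =>
      dsimp only
      by_cases hfc : c' ∈ fc
      · have hfcB : PySem.Set.contains fc c' = true := by
          simpa [PySem.Set.contains, List.contains_iff_mem] using hfc
        rw [hfcB]
        rw [if_neg (by simp)]
        refine ⟨hnd, fun c => ?_⟩
        constructor
        · exact Or.inl
        · rintro (h | ⟨h1, _, _, h4⟩)
          · exact h
          · injection h4 with h4; subst h4; rw [hfcB] at h1; cases h1
      · have hfcB : PySem.Set.contains fc c' = false := by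
          simpa [PySem.Set.contains, List.contains_iff_mem] using hfc
        by_cases hacc : c' ∈ acc
        · have haccB : List.contains acc c' = true := by
            simpa [List.contains_iff_mem] using hacc
          rw [haccB]
          rw [if_neg (by simp)]
          refine ⟨hnd, fun c => ?_⟩
          constructor
          · exact Or.inl
          · rintro (h | ⟨_, _, _, h4⟩)
            · exact h
            · injection h4 with h4; subst h4; exact hacc
        · have haccB : List.contains acc c' = false := by
            simpa [List.contains_iff_mem] using hacc
          rw [haccB, hfcB]
          rw [if_pos (by simp)]
          refine ⟨?_, fun c => ?_⟩
          · rw [List.nodup_append]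
            refine ⟨hnd, List.nodup_singleton _, ?_⟩
            intro a ha b2 hb2
            rw [List.mem_singleton] at hb2
            subst hb2
            exact fun h => hacc (h ▸ ha)
          simp only [List.mem_append, List.mem_singleton]
          constructor
          · rintro (h | rfl)
            · exact Or.inl h
            · exact Or.inr ⟨hfcB, hb.1, hb.2, rfl⟩
          · rintro (h | ⟨_, _, _, h4⟩)
            · exact Or.inl h
            · injection h4 with h4; subst h4; exact Or.inr rfl
  · rw [if_neg hb]
    refine ⟨hnd, fun c => ?_⟩
    constructor
    · exact Or.inl
    · rintro (h | ⟨_, h2, h3, _⟩)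
      · exact h
      · exact absurd ⟨h2, h3⟩ hb

theorem adjInner_spec (fc : PySem.Set String) (all_columns : List String) (idx : Int)
    (offs : List Int) : ∀ (acc : List String), acc.Nodup →
    (offs.foldl (fun acc2 off =>
      if 0 ≤ idx + off ∧ idx + off < (all_columns.length : Int) then
        match PySem.List.pyGet? all_columns (idx + off) with
        | some c =>
          if !(PySem.Set.contains fc c) && !(List.contains acc2 c) then acc2 ++ [c] else acc2
        | none => acc2
      else acc2) acc).Nodup ∧
    ∀ c, c ∈ (offs.foldl (fun acc2 off =>
      if 0 ≤ idx + off ∧ idx + off < (all_columns.length : Int) then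
        match PySem.List.pyGet? all_columns (idx + off) with
        | some c =>
          if !(PySem.Set.contains fc c) && !(List.contains acc2 c) then acc2 ++ [c] else acc2
        | none => acc2
      else acc2) acc) ↔ c ∈ acc ∨ (PySem.Set.contains fc c = false ∧
        ∃ off ∈ offs, 0 ≤ idx + off ∧ idx + off < (all_columns.length : Int) ∧
          PySem.List.pyGet? all_columns (idx + off) = some c) := by
  induction offs with
  | nil => intro acc hnd; exact ⟨hnd, fun c => by simp⟩
  | cons off offs ih =>
    intro acc hnd
    rw [List.foldl_cons]
    obtain ⟨hnd1, hmem1⟩ := adjStep_spec fc all_columns (idx + off) acc hnd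
    obtain ⟨hnd2, hmem2⟩ := ih _ hnd1
    refine ⟨hnd2, fun c => ?_⟩
    rw [hmem2]
    constructor
    · rintro (h | ⟨h1, o, ho, h2⟩)
      · rcases (hmem1 c).mp h with h' | ⟨h1, h2, h3, h4⟩
        · exact Or.inl h'
        · exact Or.inr ⟨h1, off, List.mem_cons_self .., h2, h3, h4⟩
      · exact Or.inr ⟨h1, o, List.mem_cons_of_mem _ ho, h2⟩
    · rintro (h | ⟨h1, o, ho, h2⟩)
      · exact Or.inl ((hmem1 c).mpr (Or.inl h))
      · rcases List.mem_cons.mp ho with rfl | ho'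
        · exact Or.inl ((hmem1 c).mpr (Or.inr ⟨h1, h2⟩))
        · exact Or.inr ⟨h1, o, ho', h2⟩

theorem adjRaw_spec (fc : PySem.Set String) (all_columns : List String) :
    (asmAdjRaw fc all_columns).Nodup ∧
    (∀ c, c ∈ asmAdjRaw fc all_columns ↔
      (PySem.Set.contains fc c = false ∧ ∃ i ∈ asmKept fc all_columns,
        ∃ off ∈ ([-2, -1, 1, 2] : List Int), 0 ≤ i + off ∧ i + off < (all_columns.length : Int) ∧
          PySem.List.pyGet? all_columns (i + off) = some c)) := by
  unfold asmAdjRaw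
  have main : ∀ (idxs : List Int) (acc : List String), acc.Nodup →
      (idxs.foldl (fun acc idx =>
        ([-2, -1, 1, 2] : List Int).foldl (fun acc2 off =>
          if 0 ≤ idx + off ∧ idx + off < (all_columns.length : Int) then
            match PySem.List.pyGet? all_columns (idx + off) with
            | some c =>
              if !(PySem.Set.contains fc c) && !(List.contains acc2 c) then acc2 ++ [c] else acc2
            | none => acc2
          else acc2) acc) acc).Nodup ∧
      ∀ c, c ∈ (idxs.foldl (fun acc idx =>
        ([-2, -1, 1, 2] : List Int).foldl (fun acc2 off =>
          if 0 ≤ idx + off ∧ idx + off < (all_columns.length : Int) then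
            match PySem.List.pyGet? all_columns (idx + off) with
            | some c =>
              if !(PySem.Set.contains fc c) && !(List.contains acc2 c) then acc2 ++ [c] else acc2
            | none => acc2
          else acc2) acc) acc) ↔ c ∈ acc ∨ (PySem.Set.contains fc c = false ∧
        ∃ i ∈ idxs, ∃ off ∈ ([-2, -1, 1, 2] : List Int),
          0 ≤ i + off ∧ i + off < (all_columns.length : Int) ∧
            PySem.List.pyGet? all_columns (i + off) = some c) := by
    intro idxs
    induction idxs with
    | nil => intro acc hnd; exact ⟨hnd, fun c => by simp⟩
    | cons idx idxs ih =>
      intro acc hnd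
      rw [List.foldl_cons]
      obtain ⟨hnd1, hmem1⟩ := adjInner_spec fc all_columns idx ([-2, -1, 1, 2]) acc hnd
      obtain ⟨hnd2, hmem2⟩ := ih _ hnd1
      refine ⟨hnd2, fun c => ?_⟩
      rw [hmem2]
      constructor
      · rintro (h | ⟨h1, i, hi, h2⟩)
        · rcases (hmem1 c).mp h with h' | ⟨h1, h2⟩
          · exact Or.inl h'
          · exact Or.inr ⟨h1, idx, List.mem_cons_self .., h2⟩
        · exact Or.inr ⟨h1, i, List.mem_cons_of_mem _ hi, h2⟩
      · rintro (h | ⟨h1, i, hi, h2⟩)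
        · exact Or.inl ((hmem1 c).mpr (Or.inl h))
        · rcases List.mem_cons.mp hi with rfl | hi'
          · exact Or.inl ((hmem1 c).mpr (Or.inr ⟨h1, h2⟩))
          · exact Or.inr ⟨h1, i, hi', h2⟩
  obtain ⟨hnd, hmem⟩ := main (PySem.List.sorted (asmKept fc all_columns) (fun x => x) false) [] (by simp)
  refine ⟨hnd, fun c => ?_⟩
  rw [hmem]
  simp [PySem.List.mem_sorted]

theorem foldA_count (E : Int) (l : List String) : ∀ (s : PySem.Set String) (n : Int),
    (l.foldl (fun (p : PySem.Set String × Int) col =>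
      if E ≤ p.2 then p else (PySem.Set.add p.1 col, p.2 + 1)) (s, n)).1
    = PySem.Set.update s (l.take (E - n).toNat) := by
  induction l with
  | nil => intro s n; simp [PySem.Set.update]
  | cons c l ih =>
    intro s n
    by_cases h : E ≤ n
    · have h0 : (E - n).toNat = 0 := by omega
      simp only [List.foldl_cons, if_pos h, ih, h0, List.take_zero]
    · have h1 : (E - n).toNat = (E - (n + 1)).toNat + 1 := by omega
      simp only [List.foldl_cons, if_neg h, ih, h1, List.take_succ_cons]
      rfl

theorem bKept_eq (fc : PySem.Set String) (all_columns : List String) :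
    bKept fc all_columns = asmKept fc all_columns := rfl

theorem adj_eq (fc : PySem.Set String) (all_columns : List String) :
    asmAdjacent fc all_columns
      = lrecSel (bNear (bKept fc all_columns) all_columns) all_columns fc := by
  obtain ⟨ndA, memA⟩ := adjRaw_spec fc all_columns
  obtain ⟨ndL, memL, hlb, pwL⟩ := lrecSel_spec (bNear (bKept fc all_columns) all_columns)
    all_columns all_columns [] fc rfl (by simp)
  unfold asmAdjacent
  apply PySem.List.sorted_eq_of_perm_of_pairwise_lt
  · rw [List.perm_ext_iff_of_nodup ndL ndA]
    intro c
    rw [memL c, memA c]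
    constructor
    · rintro ⟨hct, hcs, hcn⟩
      refine ⟨hcs, ?_⟩
      have hcn' : c ∈ bNear (bKept fc all_columns) all_columns :=
        (PySem.Set.contains_iff _ _).mp hcn
      obtain ⟨j, hj, hcj, hany⟩ := (bNear_mem _ _ c).mp hcn'
      obtain ⟨o, ho, hko⟩ := List.any_eq_true.mp hany
      have hio : ((j : Int) + o) ∈ asmKept fc all_columns := by
        rw [← bKept_eq]; exact (PySem.Set.contains_iff _ _).mp hko
      refine ⟨(j : Int) + o, hio, -o, ?_, by omega, by omega, ?_⟩
      · have ho4 : o = -2 ∨ o = -1 ∨ o = 1 ∨ o = 2 := by simpa using ho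
        rcases ho4 with rfl | rfl | rfl | rfl <;> decide
      · rw [show (j : Int) + o + -o = (j : Int) by ring, PySem.List.pyGet?_natCast,
          List.getElem?_eq_getElem hj, hcj]
    · rintro ⟨hcs, i, hik, off, hoff, hb0, hb1, hget⟩
      have hcmem : c ∈ all_columns := PySem.List.mem_of_pyGet?_eq_some all_columns hget
      refine ⟨hcmem, hcs, ?_⟩
      have hji : (((i + off).toNat : Nat) : Int) = i + off := Int.toNat_of_nonneg hb0
      have hjlen : (i + off).toNat < all_columns.length := by omega
      have hallj : all_columns[(i + off).toNat] = c := by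
        rw [← hji, PySem.List.pyGet?_natCast, List.getElem?_eq_getElem hjlen] at hget
        exact Option.some.inj hget
      refine (PySem.Set.contains_iff _ _).mpr ((bNear_mem _ _ c).mpr
        ⟨(i + off).toNat, hjlen, hallj, List.any_eq_true.mpr ⟨-off, ?_, ?_⟩⟩)
      · have ho4 : off = -2 ∨ off = -1 ∨ off = 1 ∨ off = 2 := by simpa using hoff
        rcases ho4 with rfl | rfl | rfl | rfl <;> decide
      · rw [show (((i + off).toNat : Nat) : Int) + -off = i by omega, bKept_eq]
        exact (PySem.Set.contains_iff _ _).mpr hik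
  · exact pwL

-- ===== VERDICT (by name: the statement is the Claim_ definition above) =====
theorem apply_safety_margin_spec : Claim_equal_apply_safety_margin := by
  intro table_name required_columns all_columns question hints is_primary_table widened _
  unfold Spec_apply_safety_margin apply_safety_margin apply_safety_margin_alt
  by_cases hA : ((all_columns.length : Int) ≤ 8)
  · simp only [if_pos hA]
  · simp only [if_neg hA]
    rw [candidates_eq]
    have hupd : ∀ (x : PySem.Set String) (l : List String),
        List.foldl (fun s col => PySem.Set.add s col) x l = PySem.Set.update x l := fun _ _ => rfl
    rw [hupd]
    set F1 : PySem.Set String := PySem.Set.update (PySem.Set.ofList required_columns)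
      (PySem.List.slice
        (bCandidates (PySem.Set.ofList required_columns) all_columns
          (PySem.Chars.lower question.toList) (PySem.Chars.lower (hints.getD "").toList))
        none (some (if widened = true then 8 else 5))) with hF1
    have hE : (0 : Int) ≤ (if widened = true then 8 else 5) := by
      by_cases hw : widened = true <;> simp [hw]
    by_cases hC : is_primary_table = true ∧ PySem.Set.len F1 < (all_columns.length : Int)
    · simp only [if_pos hC]
      rw [foldA_count, foldB_count _ _ _ _ hE, adj_eq, sub_zero]
      set F2 : PySem.Set String := PySem.Set.update F1
        ((lrecSel (bNear (bKept F1 all_columns) all_columns) all_columns F1).take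
          (if widened = true then (8:Int) else 5).toNat) with hF2
      set mc : Int := min (if widened = true then (5:Int) else 4) (all_columns.length : Int) with hmc
      by_cases hD : PySem.Set.len F2 < mc
      · rw [if_pos hD, if_pos (by omega : (0:Int) < mc - PySem.Set.len F2)]
        exact foldD_eq mc all_columns F2 (le_of_lt hD)
      · rw [if_neg hD, if_neg (by omega : ¬ (0:Int) < mc - PySem.Set.len F2)]
    · simp only [if_neg hC]
      set mc : Int := min (if widened = true then (5:Int) else 4) (all_columns.length : Int) with hmc
      by_cases hD : PySem.Set.len F1 < mc
      · rw [if_pos hD, if_pos (by omega : (0:Int) < mc - PySem.Set.len F1)]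
        exact foldD_eq mc all_columns F1 (le_of_lt hD)
      · rw [if_neg hD, if_neg (by omega : ¬ (0:Int) < mc - PySem.Set.len F1)]
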